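-- pv_equiv track=rewrite | github.com/Ahmed-Abouzeid/MMSS_extended | utils.py | get_user_adjacencies
-- ===== SOURCE A (Python) =====
-- def get_user_adjacencies(adjacency_matrix):
--     """helper function to retrieve the adjacent users for each user"""
--
--     adjacents = {}
--     for user_index in range(len(adjacency_matrix)):
--         adjacent_users = set()
--         for e, col in enumerate(adjacency_matrix[user_index]):
--             if adjacency_matrix[user_index][e] > 0:
--                 adjacent_users.add(e)
--
--         for e, row in enumerate(adjacency_matrix):
--             for e_col, col in enumerate(row):
--                 if e_col == user_index:
--                     if row[user_index] > 0:
--                         adjacent_users.add(e)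
--         adjacents.update({user_index: adjacent_users})
--
--     return adjacents
-- ===== SOURCE B (Python) =====
-- def get_user_adjacencies(adjacency_matrix):
--     """helper function to retrieve the adjacent users for each user"""
--
--     n = len(adjacency_matrix)
--     # one scatter pass: incoming[j] = rows i whose column j is positive (only valid users j < n)
--     incoming = [[] for _ in range(n)]
--     for i, row in enumerate(adjacency_matrix):
--         for j, v in enumerate(row):
--             if j < n and v > 0:
--                 incoming[j].append(i)
--     adjacents = {}
--     for u, row in enumerate(adjacency_matrix):
--         s = set()
--         for j, v in enumerate(row):
--             if v > 0:
--                 s.add(j)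
--         s.update(incoming[u])
--         adjacents[u] = s
--     return adjacents
-- ===== Notes on version B (the rewrite author's own statement) =====
-- stated objective: faster
-- what changed: B pre-builds every user's incoming-neighbour list in one scatter pass over the matrix instead of A's per-user rescan of the entire matrix (with an inner loop that only hunts for the column equal to the user index).
import Mathlib
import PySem

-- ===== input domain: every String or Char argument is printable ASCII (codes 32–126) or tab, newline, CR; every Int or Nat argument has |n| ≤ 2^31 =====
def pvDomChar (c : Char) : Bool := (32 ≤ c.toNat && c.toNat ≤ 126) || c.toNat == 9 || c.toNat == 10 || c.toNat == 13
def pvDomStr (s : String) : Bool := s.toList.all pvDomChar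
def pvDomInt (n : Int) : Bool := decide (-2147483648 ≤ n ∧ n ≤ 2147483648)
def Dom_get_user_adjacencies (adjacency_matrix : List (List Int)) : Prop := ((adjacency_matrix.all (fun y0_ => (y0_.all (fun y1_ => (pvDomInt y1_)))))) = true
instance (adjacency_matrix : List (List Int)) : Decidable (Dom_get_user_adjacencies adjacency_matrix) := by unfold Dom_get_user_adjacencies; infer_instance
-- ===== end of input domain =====

-- B replaces A's per-user rescan of the whole matrix with one scatter pass that
-- pre-builds each user's incoming-neighbour list (objective: faster).

-- ===== PORT A =====
-- inner 'for e, col in enumerate(adjacency_matrix[user_index]): if adjacency_matrix[user_index][e] > 0: adjacent_users.add(e)'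
def aOutgoing (row : List Int) : PySem.Set Int :=
  (PySem.List.enumerate row).foldl
    (fun s p => if PySem.List.pyGetD row p.1 0 > 0 then PySem.Set.add s p.1 else s)
    PySem.Set.empty

-- 'for e, row in enumerate(adjacency_matrix): for e_col, col in enumerate(row): if e_col == user_index: if row[user_index] > 0: adjacent_users.add(e)'
-- (row[user_index] is read only when e_col == user_index holds, so the index is in range: pyGetD is exact here)
def aIncoming (m : List (List Int)) (u : Int) (s0 : PySem.Set Int) : PySem.Set Int :=
  (PySem.List.enumerate m).foldl
    (fun s q =>
      (PySem.List.enumerate q.2).foldl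
        (fun s r =>
          if r.1 = u then
            (if PySem.List.pyGetD q.2 u 0 > 0 then PySem.Set.add s q.1 else s)
          else s)
        s)
    s0

-- outer 'for user_index in range(len(adjacency_matrix))'; adjacency_matrix[user_index] is in range, so pyGetD is exact
def get_user_adjacencies (adjacency_matrix : List (List Int)) : List (Int × List Int) :=
  ((PySem.List.pyRange 0 adjacency_matrix.length 1).foldl
      (fun adjacents user_index =>
        adjacents.insert user_index
          (aIncoming adjacency_matrix user_index
            (aOutgoing (PySem.List.pyGetD adjacency_matrix user_index []))))
      PySem.Dict.empty).items

-- ===== PORT B =====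
-- 'for j, v in enumerate(row): if j < n and v > 0: incoming[j].append(i)'  (j < n keeps the write in range: pySetD/pyGetD exact)
def bScatterRow (n : Int) (inc : List (List Int)) (i : Int) (row : List Int) : List (List Int) :=
  (PySem.List.enumerate row).foldl
    (fun inc p =>
      if p.1 < n ∧ p.2 > 0 then
        PySem.List.pySetD inc p.1 (PySem.List.pyGetD inc p.1 [] ++ [i])
      else inc)
    inc

-- 'for j, v in enumerate(row): if v > 0: s.add(j)'
def bOutgoing (row : List Int) : PySem.Set Int :=
  (PySem.List.enumerate row).foldl
    (fun s p => if p.2 > 0 then PySem.Set.add s p.1 else s)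
    PySem.Set.empty

-- incoming[u] is read with 0 <= u < n, so pyGetD is exact
def get_user_adjacencies_alt (adjacency_matrix : List (List Int)) : List (Int × List Int) :=
  let n : Int := adjacency_matrix.length
  let incoming : List (List Int) :=
    (PySem.List.enumerate adjacency_matrix).foldl
      (fun inc q => bScatterRow n inc q.1 q.2)
      (List.replicate adjacency_matrix.length ([] : List Int))
  ((PySem.List.enumerate adjacency_matrix).foldl
      (fun adjacents q =>
        adjacents.insert q.1
          (PySem.Set.update (bOutgoing q.2) (PySem.List.pyGetD incoming q.1 [])))
      PySem.Dict.empty).items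

-- ===== PRECONDITION & SPEC =====
def Spec_get_user_adjacencies (adjacency_matrix : List (List Int)) (out : List (Int × List Int)) : Prop := out = get_user_adjacencies_alt adjacency_matrix
instance (adjacency_matrix : List (List Int)) (out : List (Int × List Int)) : Decidable (Spec_get_user_adjacencies adjacency_matrix out) := by unfold Spec_get_user_adjacencies; infer_instance

-- ===== CLAIM (what is proved, stated in full; the proofs are below) =====
def Claim_equal_get_user_adjacencies : Prop := ∀ (adjacency_matrix : List (List Int)), Dom_get_user_adjacencies adjacency_matrix → Spec_get_user_adjacencies adjacency_matrix (get_user_adjacencies adjacency_matrix)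

-- ===== LEMMAS AND PROOFS =====

-- the incoming-neighbour list of user k: rows whose column k is positive
def adjFilter (m : List (List Int)) (k : Nat) : List Int :=
  ((PySem.List.enumerate m).filter
      (fun q => decide (k < q.2.length) && decide (q.2.getD k 0 > 0))).map (·.1)

-- both outgoing loops add the same indices
lemma out_eq (row : List Int) : aOutgoing row = bOutgoing row := by
  unfold aOutgoing bOutgoing
  apply PySem.List.foldl_congr_mem
  intro acc p hp
  rw [PySem.List.mem_enumerate_iff] at hp
  obtain ⟨j, hj, rfl⟩ := hp
  simp [PySem.List.pyGetD_natCast, List.getElem?_eq_getElem hj]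

-- a fold over enumerate whose body fires only when the index equals ↑u applies X exactly once (iff ↑u is a valid index)
lemma foldl_enumerate_hit {σ : Type} (u : Nat) (X : σ → σ) :
    ∀ (row : List Int) (s0 : Nat) (init : σ),
      (PySem.List.enumerate row (s0 : Int)).foldl
          (fun s p => if p.1 = (u : Int) then X s else s) init
        = if s0 ≤ u ∧ u < s0 + row.length then X init else init := by
  intro row
  induction row with
  | nil =>
    intro s0 init
    rw [PySem.List.enumerate_nil, List.foldl_nil, if_neg (by simp only [List.length_nil]; omega)]
  | cons a row ih =>
    intro s0 init
    simp only [PySem.List.enumerate_cons, List.foldl_cons]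
    have hcast : ((s0 : Int) + 1) = ((s0 + 1 : Nat) : Int) := by push_cast; ring
    by_cases h : s0 = u
    · subst h
      rw [if_pos rfl, hcast, ih (s0 + 1) (X init), if_neg (by omega),
          if_pos (by simp only [List.length_cons]; omega)]
    · rw [if_neg (by simp; omega), hcast, ih (s0 + 1) init]
      have hiff : (s0 + 1 ≤ u ∧ u < s0 + 1 + row.length) ↔ (s0 ≤ u ∧ u < s0 + (a :: row).length) := by
        simp only [List.length_cons]; omega
      simp only [hiff]

-- A's incoming double loop is: update the set with adjFilter
lemma aIncoming_eq (m : List (List Int)) (k : Nat) (s : PySem.Set Int) :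
    aIncoming m (k : Int) s = PySem.Set.update s (adjFilter m k) := by
  unfold aIncoming adjFilter PySem.Set.update
  rw [List.foldl_map, List.foldl_filter]
  apply PySem.List.foldl_congr_mem
  intro acc q _
  have e0 : PySem.List.enumerate q.2 = PySem.List.enumerate q.2 ((0 : Nat) : Int) := rfl
  rw [e0, foldl_enumerate_hit k
        (fun s => if PySem.List.pyGetD q.2 (k : Int) 0 > 0 then PySem.Set.add s q.1 else s)]
  simp only [PySem.List.pyGetD_natCast, Nat.zero_add, Nat.zero_le, true_and]
  by_cases h1 : k < q.2.length
  · by_cases h2 : 0 < q.2[k]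
    · simp [h1, h2]
    · simp [h1, h2]
  · simp [h1]

-- the scatter inner loop preserves the length of incoming
lemma bScatterRow_length (n : Int) (i : Int) :
    ∀ (row : List Int) (s0 : Int) (inc : List (List Int)),
      ((PySem.List.enumerate row s0).foldl
          (fun inc p =>
            if p.1 < n ∧ p.2 > 0 then
              PySem.List.pySetD inc p.1 (PySem.List.pyGetD inc p.1 [] ++ [i])
            else inc) inc).length = inc.length := by
  intro row
  induction row with
  | nil => intro s0 inc; rw [PySem.List.enumerate_nil, List.foldl_nil]
  | cons a row ih =>
    intro s0 inc
    rw [PySem.List.enumerate_cons, List.foldl_cons, ih]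
    split_ifs
    · exact PySem.List.length_pySetD ..
    · rfl

-- what one scatter row contributes to incoming[u]
lemma bScatterRow_get (n : Nat) (i : Int) (u : Nat) (hu : u < n) :
    ∀ (row : List Int) (s0 : Nat) (inc : List (List Int)), inc.length = n →
      PySem.List.pyGetD
          ((PySem.List.enumerate row (s0 : Int)).foldl
            (fun inc p =>
              if p.1 < (n : Int) ∧ p.2 > 0 then
                PySem.List.pySetD inc p.1 (PySem.List.pyGetD inc p.1 [] ++ [i])
              else inc) inc) (u : Int) []
        = PySem.List.pyGetD inc (u : Int) []
            ++ (if s0 ≤ u ∧ u < s0 + row.length ∧ row.getD (u - s0) 0 > 0 then [i] else []) := by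
  intro row
  induction row with
  | nil =>
    intro s0 inc hlen
    rw [PySem.List.enumerate_nil, List.foldl_nil,
        if_neg (by simp only [List.length_nil]; omega), List.append_nil]
  | cons a row ih =>
    intro s0 inc hlen
    simp only [PySem.List.enumerate_cons, List.foldl_cons]
    have hcast : ((s0 : Int) + 1) = ((s0 + 1 : Nat) : Int) := by push_cast; ring
    have hshift : s0 + 1 ≤ u → (a :: row).getD (u - s0) 0 = row.getD (u - (s0 + 1)) 0 := by
      intro h
      have h2 : u - s0 = (u - (s0 + 1)) + 1 := by omega
      rw [h2, List.getD_cons_succ]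
    have hlen1 : (if (s0 : Int) < (n : Int) ∧ a > 0 then
          PySem.List.pySetD inc (s0 : Int) (PySem.List.pyGetD inc (s0 : Int) [] ++ [i])
        else inc).length = n := by
      split_ifs
      · rw [PySem.List.length_pySetD]; exact hlen
      · exact hlen
    have hget1 : PySem.List.pyGetD (if (s0 : Int) < (n : Int) ∧ a > 0 then
          PySem.List.pySetD inc (s0 : Int) (PySem.List.pyGetD inc (s0 : Int) [] ++ [i])
        else inc) (u : Int) []
        = PySem.List.pyGetD inc (u : Int) [] ++ (if s0 = u ∧ a > 0 then [i] else []) := by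
      by_cases hsu : s0 = u
      · subst hsu
        by_cases ha : a > 0
        · rw [if_pos ⟨by exact_mod_cast hu, ha⟩,
              PySem.List.pyGetD_pySetD_natCast inc s0 s0 _ [] (by omega), if_pos rfl,
              if_pos ⟨rfl, ha⟩]
        · rw [if_neg (by simp [ha]), if_neg (by simp [ha]), List.append_nil]
      · have htail : (if s0 = u ∧ a > 0 then ([i] : List Int) else []) = [] := by simp [hsu]
        rw [htail, List.append_nil]
        split_ifs with hc
        · rw [PySem.List.pyGetD_pySetD_natCast inc s0 u _ [] (by rw [hlen]; exact_mod_cast hc.1),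
              if_neg (fun hh => hsu hh.symm)]
        · rfl
    rw [hcast, ih (s0 + 1) _ hlen1, hget1, List.append_assoc]
    congr 1
    by_cases hsu : s0 = u
    · subst hsu
      by_cases ha : a > 0
      · rw [if_pos ⟨rfl, ha⟩, if_neg (by omega), List.append_nil,
            if_pos ⟨le_refl _, by simp only [List.length_cons]; omega,
                    by simpa using ha⟩]
      · rw [if_neg (by simp [ha]), if_neg (by omega), List.nil_append,
            if_neg (by intro hh; exact ha (by simpa using hh.2.2))]
    · rw [if_neg (by simp [hsu]), List.nil_append]
      have hiff : (s0 + 1 ≤ u ∧ u < s0 + 1 + row.length ∧ row.getD (u - (s0 + 1)) 0 > 0)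
          ↔ (s0 ≤ u ∧ u < s0 + (a :: row).length ∧ (a :: row).getD (u - s0) 0 > 0) := by
        constructor
        · rintro ⟨ha, hb, hc⟩
          exact ⟨by omega, by simp only [List.length_cons]; omega, by rw [hshift ha]; exact hc⟩
        · rintro ⟨ha, hb, hc⟩
          have hle : s0 + 1 ≤ u := by omega
          refine ⟨hle, by simp only [List.length_cons] at hb; omega, ?_⟩
          rw [← hshift hle]; exact hc
      simp only [hiff]

-- the whole scatter pass fills incoming[u] with adjFilter
lemma scatter_get (n : Nat) (u : Nat) (hu : u < n) :
    ∀ (l : List (Int × List Int)) (inc : List (List Int)), inc.length = n →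
      PySem.List.pyGetD
          (l.foldl (fun inc q => bScatterRow (n : Int) inc q.1 q.2) inc) (u : Int) []
        = PySem.List.pyGetD inc (u : Int) []
            ++ (l.filter (fun q => decide (u < q.2.length) && decide (q.2.getD u 0 > 0))).map (·.1) := by
  intro l
  induction l with
  | nil => intro inc hlen; simp
  | cons q l ih =>
    intro inc hlen
    rw [List.foldl_cons]
    have hlen' : (bScatterRow (n : Int) inc q.1 q.2).length = n := by
      unfold bScatterRow; rw [bScatterRow_length]; exact hlen
    rw [ih _ hlen']
    unfold bScatterRow
    have e0 : PySem.List.enumerate q.2 = PySem.List.enumerate q.2 ((0 : Nat) : Int) := rfl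
    rw [e0, bScatterRow_get n q.1 u hu q.2 0 inc hlen]
    rw [List.filter_cons]
    by_cases h1 : u < q.2.length
    · by_cases h2 : 0 < q.2[u]
      · simp [h1, h2, List.append_assoc]
      · simp [h1, h2]
    · simp [h1]

theorem get_user_adjacencies_spec : Claim_equal_get_user_adjacencies := by
  intro m _
  unfold Spec_get_user_adjacencies get_user_adjacencies get_user_adjacencies_alt
  dsimp only
  rw [PySem.Dict.items_foldl_insert_fresh
        (PySem.List.pyRange 0 (m.length : Int) 1) (fun u => u)
        (fun u => aIncoming m u (aOutgoing (PySem.List.pyGetD m u [])))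
        PySem.Dict.empty
        (fun a _ => PySem.Dict.contains_empty a)
        (by rw [List.map_id_fun']; exact PySem.List.nodup_pyRange_one 0 (m.length : Int)),
      PySem.Dict.items_foldl_insert_fresh
        (PySem.List.enumerate m) (fun q => q.1)
        (fun q => PySem.Set.update (bOutgoing q.2)
          (PySem.List.pyGetD ((PySem.List.enumerate m).foldl
            (fun inc q => bScatterRow (m.length : Int) inc q.1 q.2)
            (List.replicate m.length ([] : List Int))) q.1 []))
        PySem.Dict.empty
        (fun a _ => PySem.Dict.contains_empty a.1)
        (by rw [PySem.List.map_fst_enumerate]; exact PySem.List.nodup_pyRange_one _ _)]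
  rw [show (PySem.Dict.empty : PySem.Dict Int (PySem.Set Int)).items = [] from rfl,
      List.nil_append, List.nil_append]
  conv_rhs => rw [PySem.List.enumerate_eq_map_pyRange m [], List.map_map]
  apply List.map_congr_left
  intro u hu
  rw [PySem.List.mem_pyRange_one] at hu
  obtain ⟨k, rfl⟩ := Int.eq_ofNat_of_zero_le hu.1
  have hk : k < m.length := by exact_mod_cast hu.2
  simp only [Function.comp]
  refine congrArg (fun t => ((k : Int), t)) ?_
  rw [out_eq, aIncoming_eq]
  refine congrArg (PySem.Set.update (bOutgoing (PySem.List.pyGetD m (k : Int) []))) ?_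
  rw [← PySem.List.enumerate_eq_map_pyRange m []]
  rw [scatter_get m.length k hk (PySem.List.enumerate m)
        (List.replicate m.length ([] : List Int)) (List.length_replicate ..)]
  rw [PySem.List.pyGetD_natCast, List.getD_replicate _ hk, List.nil_append]
  rfl
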